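-- pv_equiv track=rewrite | github.com/KrOstir/varia | gen-i_analysis.py | data_replace
-- ===== SOURCE A (Python) =====
-- def data_replace(data):
--     str_repl = [
--         ['JAN ', '01-'],
--         ['FEB ', '02-'],
--         ['MAR ', '03-'],
--         ['APR ', '04-'],
--         ['MAJ ', '05-'],
--         ['JUN ', '06-'],
--         ['JUL ', '07-'],
--         ['AVG ', '08-'],
--         ['SEP ', '09-'],
--         ['OKT ', '10-'],
--         ['NOV ', '11-'],
--         ['DEC ', '12-']
--     ]
--
--     for pair in str_repl:
--         data = data.replace(pair[0], pair[1])
--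
--     return data
-- ===== SOURCE B (Python) =====
-- def data_replace(data):
--     mapping = {
--         'JAN ': '01-', 'FEB ': '02-', 'MAR ': '03-', 'APR ': '04-',
--         'MAJ ': '05-', 'JUN ': '06-', 'JUL ': '07-', 'AVG ': '08-',
--         'SEP ': '09-', 'OKT ': '10-', 'NOV ': '11-', 'DEC ': '12-',
--     }
--     out = []
--     i = 0
--     n = len(data)
--     while i < n:
--         rep = mapping.get(data[i:i+4])
--         if rep is not None:
--             out.append(rep)
--             i += 4
--         else:
--             out.append(data[i])
--             i += 1
--     return ''.join(out)
-- ===== Notes on version B (the rewrite author's own statement) =====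
-- stated objective: alternative
-- what changed: Replaced twelve sequential full-string str.replace passes by a single left-to-right scan driven by a dict from 4-char month keys to their numeric codes (one pass, emit code and skip 4 on a match, else copy one char).
import Mathlib
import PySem

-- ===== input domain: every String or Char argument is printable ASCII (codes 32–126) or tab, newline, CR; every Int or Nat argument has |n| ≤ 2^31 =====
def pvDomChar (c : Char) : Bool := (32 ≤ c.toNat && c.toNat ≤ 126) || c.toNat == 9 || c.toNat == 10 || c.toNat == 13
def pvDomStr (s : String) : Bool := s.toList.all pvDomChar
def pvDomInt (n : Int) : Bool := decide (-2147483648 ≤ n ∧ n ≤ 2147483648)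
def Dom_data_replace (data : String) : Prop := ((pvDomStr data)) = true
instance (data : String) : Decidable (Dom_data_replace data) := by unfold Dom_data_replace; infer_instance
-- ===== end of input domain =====

-- B replaces A's twelve sequential full-string replace passes by one table-driven left-to-right scan; same return value, no side effects.

-- ===== PORT A =====
def pvStrTable : List (String × String) :=
  [("JAN ", "01-"), ("FEB ", "02-"), ("MAR ", "03-"), ("APR ", "04-"),
   ("MAJ ", "05-"), ("JUN ", "06-"), ("JUL ", "07-"), ("AVG ", "08-"),
   ("SEP ", "09-"), ("OKT ", "10-"), ("NOV ", "11-"), ("DEC ", "12-")]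

def data_replace (data : String) : String :=
  pvStrTable.foldl (fun s pr => PySem.Str.replace s pr.1 pr.2) data

-- ===== PORT B =====
-- Source B's dict literal mapping each 4-char month key to its code (string keys/values as char lists)
def pvMapB : PySem.Dict (List Char) (List Char) :=
  PySem.Dict.ofList
    [(['J','A','N',' '], ['0','1','-']), (['F','E','B',' '], ['0','2','-']),
     (['M','A','R',' '], ['0','3','-']), (['A','P','R',' '], ['0','4','-']),
     (['M','A','J',' '], ['0','5','-']), (['J','U','N',' '], ['0','6','-']),
     (['J','U','L',' '], ['0','7','-']), (['A','V','G',' '], ['0','8','-']),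
     (['S','E','P',' '], ['0','9','-']), (['O','K','T',' '], ['1','0','-']),
     (['N','O','V',' '], ['1','1','-']), (['D','E','C',' '], ['1','2','-'])]

-- Source B's while loop over positions: data[i:i+4] is the 4-char window = take 4 of the remainder;
-- on a hit append the code and advance 4, otherwise copy one char and advance 1
def pvScan (l : List Char) : List Char :=
  match l with
  | [] => []
  | c :: t =>
    match PySem.Dict.get? pvMapB ((c :: t).take 4) with
    | some rep => rep ++ pvScan (t.drop 3)
    | none => c :: pvScan t
termination_by l.length
decreasing_by all_goals (simp; try omega)

def data_replace_alt (data : String) : String := String.ofList (pvScan data.toList)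

-- ===== PRECONDITION & SPEC =====
def Spec_data_replace (data : String) (out : String) : Prop := out = data_replace_alt data
instance (data : String) (out : String) : Decidable (Spec_data_replace data out) := by unfold Spec_data_replace; infer_instance

-- ===== CLAIM (what is proved, stated in full; the proofs are below) =====
def Claim_equal_data_replace : Prop := ∀ (data : String), Dom_data_replace data → Spec_data_replace data (data_replace data)

-- ===== LEMMAS AND PROOFS =====

def pvRep1 (p r : List Char) (l : List Char) : List Char :=
  match l with
  | [] => []
  | c :: t =>
    if p.isPrefixOf (c :: t) then r ++ pvRep1 p r (t.drop (p.length - 1))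
    else c :: pvRep1 p r t
termination_by l.length
decreasing_by all_goals (simp; try omega)

def pvFold (ps : List (List Char × List Char)) (l : List Char) : List Char :=
  ps.foldl (fun s pr => pvRep1 pr.1 pr.2 s) l

-- L1: a word containing no character of r is a prefix of the output only if it was one of the input
theorem pvL1 (p r : List Char) (hr : r ≠ []) :
    ∀ (n : Nat) (l q : List Char), (∀ x ∈ r, x ∉ q) → l.length ≤ n → q <+: pvRep1 p r l → q <+: l := by
  intro n
  induction n with
  | zero =>
    intro l q hq hl hpre
    have : l = [] := by cases l <;> simp_all
    subst this
    rw [pvRep1] at hpre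
    simpa using hpre
  | succ n ih =>
    intro l q hq hl hpre
    cases l with
    | nil => rw [pvRep1] at hpre; simpa using hpre
    | cons c t =>
      rw [pvRep1] at hpre
      by_cases h : p.isPrefixOf (c :: t) = true
      · rw [if_pos h] at hpre
        obtain ⟨r0, r', rfl⟩ := List.exists_cons_of_ne_nil hr
        cases q with
        | nil => exact List.nil_prefix
        | cons x q' =>
          rw [List.cons_append] at hpre
          obtain ⟨hx, _⟩ := List.cons_prefix_cons.mp hpre
          exact absurd (hx ▸ List.mem_cons_self) (hq r0 List.mem_cons_self)
      · rw [if_neg h] at hpre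
        cases q with
        | nil => exact List.nil_prefix
        | cons x q' =>
          obtain ⟨hx, hq'⟩ := List.cons_prefix_cons.mp hpre
          have : q' <+: t := ih t q' (fun x hx hmem => hq x hx (List.mem_cons_of_mem _ hmem)) (by simp at hl; omega) hq'
          exact List.cons_prefix_cons.mpr ⟨hx, this⟩

-- L3: a 4-letter pattern (no space in its first three chars) that does not match at the head
-- steps over a whole month key q0q1q2' '
theorem pvL3 (p r : List Char) (hp : p.length = 4) (hsp : ' ' ∉ p.take 3)
    (q0 q1 q2 : Char) (u : List Char) (hnm : ¬ p <+: (q0 :: q1 :: q2 :: ' ' :: u)) :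
    pvRep1 p r (q0 :: q1 :: q2 :: ' ' :: u) = q0 :: q1 :: q2 :: ' ' :: pvRep1 p r u := by
  obtain ⟨p0, p1, p2, p3, rfl⟩ : ∃ a b c d, p = [a, b, c, d] := by
    rcases p with _ | ⟨p0, _ | ⟨p1, _ | ⟨p2, _ | ⟨p3, _ | ⟨p4, tl⟩⟩⟩⟩⟩ <;>
      first
      | exact ⟨_, _, _, _, rfl⟩
      | (simp at hp)
  simp only [List.take, List.mem_cons, List.not_mem_nil, or_false, not_or] at hsp
  obtain ⟨h0, h1, h2⟩ := hsp
  rw [pvRep1, if_neg (by simpa [List.isPrefixOf_iff_prefix] using hnm)]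
  rw [pvRep1, if_neg (by simp only [List.isPrefixOf, Bool.and_eq_true, beq_iff_eq, not_and]; exact fun _ _ h => absurd h.symm h2)]
  rw [pvRep1, if_neg (by simp only [List.isPrefixOf, Bool.and_eq_true, beq_iff_eq, not_and]; exact fun _ h => absurd h.symm h1)]
  rw [pvRep1, if_neg (by simp only [List.isPrefixOf, Bool.and_eq_true, beq_iff_eq, not_and]; exact fun h => absurd h.symm h0)]

-- L4: pvRep1 steps over a block containing no head char of the pattern
theorem pvL4 (p0 : Char) (pt r : List Char) :
    ∀ (s u : List Char), p0 ∉ s → pvRep1 (p0 :: pt) r (s ++ u) = s ++ pvRep1 (p0 :: pt) r u := by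
  intro s
  induction s with
  | nil => intro u _; rfl
  | cons x s' ih =>
    intro u hx
    rw [List.cons_append, pvRep1,
      if_neg (by
        simp only [List.isPrefixOf, Bool.and_eq_true, beq_iff_eq]
        rintro ⟨rfl, -⟩
        exact hx List.mem_cons_self)]
    rw [ih u (fun hmem => hx (List.mem_cons_of_mem _ hmem))]
    simp

-- L6: pvRep1 fires exactly once at an exact match
theorem pvL6 (p0 : Char) (pt r X : List Char) :
    pvRep1 (p0 :: pt) r ((p0 :: pt) ++ X) = r ++ pvRep1 (p0 :: pt) r X := by
  rw [List.cons_append, pvRep1,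
    if_pos (List.isPrefixOf_iff_prefix.mpr (by rw [← List.cons_append]; exact List.prefix_append _ _))]
  congr 1
  · congr 1
    have : (p0 :: pt).length - 1 = pt.length := by simp
    rw [this, List.drop_left]

-- L5: when no pattern matches at the head, the whole fold commutes with cons
theorem pvL5 : ∀ (ps : List (List Char × List Char)) (c : Char) (s : List Char),
    (∀ pr ∈ ps, pr.2 ≠ []) →
    (∀ pr ∈ ps, ∀ pr' ∈ ps, ∀ x ∈ pr.2, x ∉ pr'.1) →
    (∀ pr ∈ ps, ¬ pr.1 <+: (c :: s)) →
    pvFold ps (c :: s) = c :: pvFold ps s := by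
  intro ps
  induction ps with
  | nil => intro c s _ _ _; rfl
  | cons h rest ih =>
    intro c s hne hdisj hnm
    have hstep : pvRep1 h.1 h.2 (c :: s) = c :: pvRep1 h.1 h.2 s := by
      rw [pvRep1, if_neg (by
        simpa [List.isPrefixOf_iff_prefix] using hnm h List.mem_cons_self)]
    have hrecnm : ∀ pr ∈ rest, ¬ pr.1 <+: (c :: pvRep1 h.1 h.2 s) := by
      intro pr hm hcon
      cases hp1 : pr.1 with
      | nil => exact hnm pr (List.mem_cons_of_mem _ hm) (hp1 ▸ List.nil_prefix)
      | cons a q =>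
        rw [hp1] at hcon
        obtain ⟨rfl, hq⟩ := List.cons_prefix_cons.mp hcon
        have hq' : ∀ x ∈ h.2, x ∉ q := by
          intro x hx hmem
          exact hdisj h List.mem_cons_self pr (List.mem_cons_of_mem _ hm) x hx
            (hp1 ▸ List.mem_cons_of_mem _ hmem)
        have : q <+: s :=
          pvL1 h.1 h.2 (hne h List.mem_cons_self) s.length s q hq' le_rfl hq
        exact hnm pr (List.mem_cons_of_mem _ hm) (hp1 ▸ List.cons_prefix_cons.mpr ⟨rfl, this⟩)
    show pvFold rest (pvRep1 h.1 h.2 (c :: s)) = c :: pvFold rest (pvRep1 h.1 h.2 s)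
    rw [hstep]
    exact ih c (pvRep1 h.1 h.2 s)
      (fun pr hm => hne pr (List.mem_cons_of_mem _ hm))
      (fun pr hm pr' hm' => hdisj pr (List.mem_cons_of_mem _ hm) pr' (List.mem_cons_of_mem _ hm'))
      hrecnm

-- B1: the whole fold steps over a month key none of its patterns matches
theorem pvB1 : ∀ (ps : List (List Char × List Char)) (q0 q1 q2 : Char) (u : List Char),
    (∀ pr ∈ ps, pr.1.length = 4 ∧ ' ' ∉ pr.1.take 3) →
    (∀ pr ∈ ps, ¬ pr.1 <+: (q0 :: q1 :: q2 :: ' ' :: u)) →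
    pvFold ps (q0 :: q1 :: q2 :: ' ' :: u) = q0 :: q1 :: q2 :: ' ' :: pvFold ps u := by
  intro ps
  induction ps with
  | nil => intro q0 q1 q2 u _ _; rfl
  | cons h rest ih =>
    intro q0 q1 q2 u hshape hnm
    have hstep := pvL3 h.1 h.2 (hshape h List.mem_cons_self).1 (hshape h List.mem_cons_self).2
      q0 q1 q2 u (hnm h List.mem_cons_self)
    show pvFold rest (pvRep1 h.1 h.2 (q0 :: q1 :: q2 :: ' ' :: u)) = _
    rw [hstep]
    have hrecnm : ∀ pr ∈ rest, ¬ pr.1 <+: (q0 :: q1 :: q2 :: ' ' :: pvRep1 h.1 h.2 u) := by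
      intro pr hm hcon
      obtain ⟨t', ht'⟩ := hcon
      have hlen : pr.1.length = 4 := (hshape pr (List.mem_cons_of_mem _ hm)).1
      have heq : pr.1 = [q0, q1, q2, ' '] := by
        have h4 : List.take 4 (q0 :: q1 :: q2 :: ' ' :: pvRep1 h.1 h.2 u) = [q0, q1, q2, ' '] := rfl
        rw [← ht', ← hlen, List.take_left] at h4
        exact h4
      exact hnm pr (List.mem_cons_of_mem _ hm)
        (heq ▸ (⟨u, rfl⟩ : [q0, q1, q2, ' '] <+: (q0 :: q1 :: q2 :: ' ' :: u)))
    exact ih q0 q1 q2 (pvRep1 h.1 h.2 u)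
      (fun pr hm => hshape pr (List.mem_cons_of_mem _ hm)) hrecnm

-- B2: the whole fold steps over an already-emitted replacement block
theorem pvB2 : ∀ (ps : List (List Char × List Char)) (s u : List Char),
    (∀ pr ∈ ps, ∃ p0 pt, pr.1 = p0 :: pt ∧ p0 ∉ s) →
    pvFold ps (s ++ u) = s ++ pvFold ps u := by
  intro ps
  induction ps with
  | nil => intro s u _; rfl
  | cons h rest ih =>
    intro s u hh
    obtain ⟨p0, pt, hp, hp0⟩ := hh h List.mem_cons_self
    show pvFold rest (pvRep1 h.1 h.2 (s ++ u)) = _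
    rw [hp, pvL4 p0 pt h.2 s u hp0, ← hp]
    exact ih s (pvRep1 h.1 h.2 u) (fun pr hm => hh pr (List.mem_cons_of_mem _ hm))

def pvTableC : List (List Char × List Char) :=
  [(['J','A','N',' '], ['0','1','-']), (['F','E','B',' '], ['0','2','-']),
   (['M','A','R',' '], ['0','3','-']), (['A','P','R',' '], ['0','4','-']),
   (['M','A','J',' '], ['0','5','-']), (['J','U','N',' '], ['0','6','-']),
   (['J','U','L',' '], ['0','7','-']), (['A','V','G',' '], ['0','8','-']),
   (['S','E','P',' '], ['0','9','-']), (['O','K','T',' '], ['1','0','-']),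
   (['N','O','V',' '], ['1','1','-']), (['D','E','C',' '], ['1','2','-'])]

theorem pvGet?_eq_find? : ∀ (ps : List (List Char × List Char)) (k : List Char),
    (PySem.Dict.mk ps).get? k = (ps.find? (fun pr => pr.1 == k)).map (·.2) := by
  intro ps
  induction ps with
  | nil => intro k; rfl
  | cons h rest ih =>
    intro k
    rw [show (h :: rest : List (List Char × List Char)) = (h.1, h.2) :: rest by simp]
    rw [PySem.Dict.get?_mk_cons]
    by_cases hk : (h.1 == k) = true
    · simp [List.find?, hk]
    · simp only [List.find?, hk]
      exact ih k

set_option maxRecDepth 8000 in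
theorem pvFact1 : ∀ pr ∈ pvTableC,
    pr.1.length = 4 ∧ pr.1.drop 3 = [' '] ∧ ' ' ∉ pr.1.take 3 ∧ pr.1 ≠ [] ∧ pr.2 ≠ [] := by decide

theorem pvFact2bool : (pvTableC.all (fun pr => pvTableC.all (fun pr' =>
    pr.2.all (fun x => !pr'.1.contains x) && (pr.1.take 1).all (fun x => !pr'.2.contains x)))) = true := by rfl

theorem pvFact2 : ∀ pr ∈ pvTableC, ∀ pr' ∈ pvTableC,
    (∀ x ∈ pr.2, x ∉ pr'.1) ∧ (∀ x ∈ pr.1.take 1, x ∉ pr'.2) := by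
  have h := pvFact2bool
  simp only [List.all_eq_true, Bool.and_eq_true, Bool.not_eq_true'] at h ⊢
  intro pr hm pr' hm'
  obtain ⟨h1, h2⟩ := h pr hm pr' hm'
  exact ⟨fun x hx => by simpa using h1 x hx, fun x hx => by simpa using h2 x hx⟩

theorem pvFact3 : pvMapB = PySem.Dict.mk pvTableC := by rfl

theorem pvFold_nil : ∀ ps : List (List Char × List Char), pvFold ps [] = [] := by
  intro ps
  induction ps with
  | nil => rfl
  | cons h rest ih =>
    show pvFold rest (pvRep1 h.1 h.2 []) = []
    rw [pvRep1]
    exact ih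

theorem pvMain : ∀ (n : Nat) (l : List Char), l.length ≤ n → pvFold pvTableC l = pvScan l := by
  intro n
  induction n with
  | zero =>
    intro l hl
    have : l = [] := by cases l <;> simp_all
    subst this
    rw [pvFold_nil, pvScan]
  | succ n ih =>
    intro l hl
    cases l with
    | nil => rw [pvFold_nil, pvScan]
    | cons c t =>
      cases hf : pvTableC.find? (fun pr => pr.1.isPrefixOf (c :: t)) with
      | none =>
        have hnm : ∀ pr ∈ pvTableC, ¬ pr.1 <+: (c :: t) := by
          intro pr hm
          have := List.find?_eq_none.mp hf pr hm
          simpa [List.isPrefixOf_iff_prefix] using this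
        have hget : PySem.Dict.get? pvMapB ((c :: t).take 4) = none := by
          rw [pvFact3, pvGet?_eq_find?]
          have hfn : pvTableC.find? (fun pr => pr.1 == (c :: t).take 4) = none := by
            rw [List.find?_eq_none]
            intro x hx hbeq
            have hx1 : x.1 = (c :: t).take 4 := by simpa using hbeq
            exact hnm x hx (hx1 ▸ List.take_prefix 4 (c :: t))
          rw [hfn]; rfl
        rw [pvL5 pvTableC c t (fun pr hm => (pvFact1 pr hm).2.2.2.2)
              (fun pr hm pr' hm' => (pvFact2 pr hm pr' hm').1) hnm,
            ih t (by simp at hl; omega)]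
        conv_rhs => rw [pvScan]
        rw [hget]
      | some pk =>
        obtain ⟨hpred, T1, T2, hsplit, hT1⟩ := List.find?_eq_some_iff_append.mp hf
        have hmem : pk ∈ pvTableC := by rw [hsplit]; exact List.mem_append_right _ List.mem_cons_self
        have hpre : pk.1 <+: (c :: t) := List.isPrefixOf_iff_prefix.mp hpred
        obtain ⟨hlen, hdrop, hsp3, hne1, hne2⟩ := pvFact1 pk hmem
        obtain ⟨a, b, d, hkey⟩ : ∃ a b d, pk.1 = [a, b, d, ' '] := by
          have hsplit3 : pk.1 = pk.1.take 3 ++ pk.1.drop 3 := (List.take_append_drop 3 pk.1).symm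
          have hlen3 : (pk.1.take 3).length = 3 := by simp [hlen]
          rcases h3 : pk.1.take 3 with _ | ⟨x, _ | ⟨y, _ | ⟨z, _ | ⟨w, tl⟩⟩⟩⟩ <;>
            rw [h3] at hlen3 <;> simp at hlen3
          exact ⟨x, y, z, by rw [hsplit3, h3, hdrop]; rfl⟩
        obtain ⟨u, hu⟩ := hpre
        rw [hkey] at hu
        obtain ⟨rfl, rfl⟩ : c = a ∧ t = b :: d :: ' ' :: u := by
          simp only [List.cons_append, List.nil_append, List.cons.injEq] at hu
          exact ⟨hu.1.symm, hu.2.symm⟩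
        have hT1mem : ∀ x ∈ T1, x ∈ pvTableC := by
          intro x hx; rw [hsplit]; exact List.mem_append_left _ hx
        have hT1nm : ∀ x ∈ T1, ¬ x.1 <+: (c :: b :: d :: ' ' :: u) := by
          intro x hx hcon
          have hb := hT1 x hx
          simp only [Bool.not_eq_true'] at hb
          exact absurd (List.isPrefixOf_iff_prefix.mpr hcon) (by simp [hb])
        -- the fold: split pvTableC at pk
        have hfold : pvFold pvTableC (c :: b :: d :: ' ' :: u) = pk.2 ++ pvFold pvTableC u := by
          rw [hsplit]
          unfold pvFold
          rw [List.foldl_append, List.foldl_append]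
          show pvFold (pk :: T2) (pvFold T1 (c :: b :: d :: ' ' :: u)) =
            pk.2 ++ pvFold (pk :: T2) (pvFold T1 u)
          rw [pvB1 T1 c b d u
            (fun pr hm => ⟨(pvFact1 pr (hT1mem pr hm)).1, (pvFact1 pr (hT1mem pr hm)).2.2.1⟩) hT1nm]
          show pvFold T2 (pvRep1 pk.1 pk.2 (c :: b :: d :: ' ' :: pvFold T1 u)) =
            pk.2 ++ pvFold T2 (pvRep1 pk.1 pk.2 (pvFold T1 u))
          have hstep := pvL6 c (b :: d :: ' ' :: []) pk.2 (pvFold T1 u)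
          simp only [List.cons_append, List.nil_append] at hstep
          rw [hkey, hstep]
          apply pvB2
          intro pr hm
          have hmem' : pr ∈ pvTableC := by
            rw [hsplit]; exact List.mem_append_right _ (List.mem_cons_of_mem _ hm)
          obtain ⟨q0, qt, hq⟩ := List.exists_cons_of_ne_nil (pvFact1 pr hmem').2.2.2.1
          refine ⟨q0, qt, hq, ?_⟩
          exact (pvFact2 pr hmem' pk hmem).2 q0 (by rw [hq]; simp)
        rw [hfold]
        -- the scan side
        have hget : PySem.Dict.get? pvMapB ((c :: b :: d :: ' ' :: u).take 4) = some pk.2 := by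
          rw [pvFact3, pvGet?_eq_find?]
          have htake : (c :: b :: d :: ' ' :: u).take 4 = pk.1 := by rw [hkey]; rfl
          rw [htake]
          have hfind : pvTableC.find? (fun pr => pr.1 == pk.1) = some pk := by
            apply List.find?_eq_some_iff_append.mpr
            refine ⟨by simp, T1, T2, hsplit, ?_⟩
            intro x hx
            have hb := hT1 x hx
            simp only [Bool.not_eq_true'] at hb
            simp only [Bool.not_eq_true', beq_eq_false_iff_ne, ne_eq]
            intro heq
            rw [heq] at hb
            exact absurd hpred (by simp [hb])
          rw [hfind]; rfl
        conv_rhs => rw [pvScan]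
        rw [hget]
        rw [ih u (by simp at hl; omega)]
        rfl

theorem pvGo_eq (p0 : Char) (pt r : List Char) :
    ∀ (fuel : Nat) (l acc : List Char), l.length ≤ fuel →
      PySem.Chars.replace.go (p0 :: pt) r fuel l acc = acc.reverse ++ pvRep1 (p0 :: pt) r l := by
  intro fuel
  induction fuel with
  | zero =>
    intro l acc hl
    have : l = [] := by cases l <;> simp_all
    subst this
    simp [PySem.Chars.replace.go, pvRep1]
  | succ n ih =>
    intro l acc hl
    cases l with
    | nil => simp [PySem.Chars.replace.go, pvRep1]
    | cons c t =>
      rw [PySem.Chars.replace.go]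
      by_cases h : (p0 :: pt).isPrefixOf (c :: t) = true
      · rw [if_pos h, ih _ _ (by simp at hl ⊢; omega), pvRep1, if_pos h]
        simp
      · rw [if_neg h, ih _ _ (by simp at hl ⊢; omega), pvRep1, if_neg h]
        simp

theorem pvReplace_eq (p r l : List Char) (hp : p ≠ []) :
    PySem.Chars.replace l p r = pvRep1 p r l := by
  obtain ⟨p0, pt, rfl⟩ := List.exists_cons_of_ne_nil hp
  rw [PySem.Chars.replace, if_neg (by simp), pvGo_eq p0 pt r l.length l [] le_rfl]
  simp

theorem pvBridge : ∀ (ps : List (String × String)) (s : String),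
    (∀ pr ∈ ps, pr.1.toList ≠ []) →
    (ps.foldl (fun s pr => PySem.Str.replace s pr.1 pr.2) s).toList
      = pvFold (ps.map fun pr => (pr.1.toList, pr.2.toList)) s.toList := by
  intro ps
  induction ps with
  | nil => intro s _; rfl
  | cons h rest ih =>
    intro s hne
    show (rest.foldl _ (PySem.Str.replace s h.1 h.2)).toList = _
    rw [ih (PySem.Str.replace s h.1 h.2) (fun pr hm => hne pr (List.mem_cons_of_mem _ hm))]
    show _ = pvFold (List.map _ rest) (pvRep1 h.1.toList h.2.toList s.toList)
    rw [PySem.Str.toList_replace, pvReplace_eq _ _ _ (hne h List.mem_cons_self)]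

theorem pvMapEq : pvStrTable.map (fun pr => (pr.1.toList, pr.2.toList)) = pvTableC := by rfl

theorem pvStrTable_ne : ∀ pr ∈ pvStrTable, pr.1.toList ≠ [] := by decide

-- ===== VERDICT (by name: the statement is the Claim_ definition above) =====
theorem data_replace_spec : Claim_equal_data_replace := by
  unfold Claim_equal_data_replace Spec_data_replace
  intro data _
  apply String.toList_inj.mp
  show (pvStrTable.foldl (fun s pr => PySem.Str.replace s pr.1 pr.2) data).toList
    = (String.ofList (pvScan data.toList)).toList
  rw [String.toList_ofList, pvBridge pvStrTable data pvStrTable_ne, pvMapEq,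
    pvMain data.toList.length data.toList le_rfl]
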